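-- pv_equiv track=rewrite | github.com/e0in/AOC | AOC_2016/7.py | SSL
-- ===== SOURCE A (Python) =====
-- def SSL(ip):
--     count = 0
--     aba = set()
--     bab = set()
--     for i in range(len(ip)-2):
--         if ip[i] == '[':
--             count += 1
--         elif ip[i] == ']':
--             count -= 1
--         elif ip[i:i+3].isalpha():
--             if (ip[i] == ip[i+2]) and (ip[i] != ip[i+1]):
--                 if count == 0:
--                     aba.add((ip[i], ip[i+1]))
--                 else:
--                     bab.add((ip[i+1], ip[i]))
--
--     return len(aba.intersection(bab)) > 0
-- ===== SOURCE B (Python) =====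
-- def SSL(ip):
--     # Phase 1: split into maximal alphabetic runs, each tagged with the
--     # bracket depth at which it occurs ('[' increases, ']' decreases).
--     segs = []
--     depth = 0
--     cur = ''
--     curdepth = 0
--     for c in ip:
--         if c.isalpha():
--             if not cur:
--                 curdepth = depth
--             cur += c
--         else:
--             if cur:
--                 segs.append((cur, curdepth))
--                 cur = ''
--             if c == '[':
--                 depth += 1
--             elif c == ']':
--                 depth -= 1
--     if cur:
--         segs.append((cur, curdepth))
--     # Phase 2: collect ABA pairs from depth-0 runs and (reversed) from the rest.
--     abas = set()
--     babs = set()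
--     for s, d in segs:
--         for i in range(len(s) - 2):
--             if s[i] == s[i + 2] and s[i] != s[i + 1]:
--                 if d == 0:
--                     abas.add((s[i], s[i + 1]))
--                 else:
--                     babs.add((s[i + 1], s[i]))
--     return bool(abas & babs)
-- ===== Notes on version B (the rewrite author's own statement) =====
-- stated objective: alternative
-- what changed: A is a single index loop interleaving the bracket-depth counter with per-window slice-and-isalpha tests over the raw string; B first segments the string into maximal alphabetic runs tagged with their bracket depth, then scans each run's windows with plain character comparisons.
import Mathlib
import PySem

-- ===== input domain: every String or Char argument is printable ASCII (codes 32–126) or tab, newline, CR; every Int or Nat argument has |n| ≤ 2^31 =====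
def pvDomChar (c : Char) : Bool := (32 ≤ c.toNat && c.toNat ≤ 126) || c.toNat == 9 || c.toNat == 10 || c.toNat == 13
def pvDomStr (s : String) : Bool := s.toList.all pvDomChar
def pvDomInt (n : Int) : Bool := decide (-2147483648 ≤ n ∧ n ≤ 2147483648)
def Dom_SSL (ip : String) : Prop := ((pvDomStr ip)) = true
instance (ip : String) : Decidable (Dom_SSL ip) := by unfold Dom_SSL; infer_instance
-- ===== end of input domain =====

-- B restructures A's single interleaved loop as: segment into depth-tagged alphabetic runs, then scan runs (alternative decomposition, same cost).

-- ===== PORT A =====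
-- the body of A's third branch (triple-alpha window test) at one index
def pvUpdA (S : PySem.Set (Char × Char) × PySem.Set (Char × Char)) (a b c : Char) (count : Int) :
    PySem.Set (Char × Char) × PySem.Set (Char × Char) :=
  if PySem.Chars.strIsalpha [a, b, c] then
    if a = c ∧ a ≠ b then
      if count = 0 then (PySem.Set.add S.1 (a, b), S.2)
      else (S.1, PySem.Set.add S.2 (b, a))
    else S
  else S

-- A's loop over i in range(len(ip)-2), carried as a 3-char lookahead on the list
def pvLoopA : List Char → Int → PySem.Set (Char × Char) × PySem.Set (Char × Char) →
    PySem.Set (Char × Char) × PySem.Set (Char × Char)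
  | a :: b :: c :: rest, count, S =>
    if a = '[' then pvLoopA (b :: c :: rest) (count + 1) S
    else if a = ']' then pvLoopA (b :: c :: rest) (count - 1) S
    else pvLoopA (b :: c :: rest) count (pvUpdA S a b c count)
  | _, _, S => S

def SSL (ip : String) : Bool :=
  let S := pvLoopA ip.toList 0 (PySem.Set.empty, PySem.Set.empty)
  decide (0 < PySem.Set.len (PySem.Set.inter S.1 S.2))

-- ===== PORT B =====
-- phase 1 of B: build the list of (maximal alphabetic run, bracket depth at its start)
def pvSegLoop : List Char → List (List Char × Int) → Int → List Char → Int → List (List Char × Int)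
  | [], segs, _depth, cur, cd => if cur = [] then segs else segs ++ [(cur, cd)]
  | c :: rest, segs, depth, cur, cd =>
    if PySem.Chars.isalpha c then
      pvSegLoop rest segs depth (cur ++ [c]) (if cur = [] then depth else cd)
    else
      pvSegLoop rest (if cur = [] then segs else segs ++ [(cur, cd)])
        (if c = '[' then depth + 1 else if c = ']' then depth - 1 else depth) [] cd

-- phase 2 of B: the window test at one position of an all-alphabetic run
def pvUpdB (S : PySem.Set (Char × Char) × PySem.Set (Char × Char)) (a b c : Char) (d : Int) :
    PySem.Set (Char × Char) × PySem.Set (Char × Char) :=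
  if a = c ∧ a ≠ b then
    if d = 0 then (PySem.Set.add S.1 (a, b), S.2)
    else (S.1, PySem.Set.add S.2 (b, a))
  else S

-- phase 2 of B: scan every window of one run
def pvWinScan : List Char → Int → PySem.Set (Char × Char) × PySem.Set (Char × Char) →
    PySem.Set (Char × Char) × PySem.Set (Char × Char)
  | a :: b :: c :: rest, d, S => pvWinScan (b :: c :: rest) d (pvUpdB S a b c d)
  | _, _, S => S

def SSL_alt (ip : String) : Bool :=
  let segs := pvSegLoop ip.toList [] 0 [] 0
  let S := segs.foldl (fun S sd => pvWinScan sd.1 sd.2 S) (PySem.Set.empty, PySem.Set.empty)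
  decide (PySem.Set.inter S.1 S.2 ≠ [])

-- ===== PRECONDITION & SPEC =====
def Spec_SSL (ip : String) (out : Bool) : Prop := out = SSL_alt ip
instance (ip : String) (out : Bool) : Decidable (Spec_SSL ip out) := by unfold Spec_SSL; infer_instance

-- ===== CLAIM (what is proved, stated in full; the proofs are below) =====
def Claim_equal_SSL : Prop := ∀ (ip : String), Dom_SSL ip → Spec_SSL ip (SSL ip)

-- ===== LEMMAS AND PROOFS =====

-- proof-side mirror of A's window processing: the windows A performs while walking a run,
-- including the (no-op) windows that straddle into non-alphabetic lookahead
def pvWinA : List Char → Int → PySem.Set (Char × Char) × PySem.Set (Char × Char) →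
    PySem.Set (Char × Char) × PySem.Set (Char × Char)
  | a :: b :: c :: rest, d, S => pvWinA (b :: c :: rest) d (pvUpdA S a b c d)
  | _, _, S => S

def pvScanSegs (l : List (List Char × Int))
    (S : PySem.Set (Char × Char) × PySem.Set (Char × Char)) :
    PySem.Set (Char × Char) × PySem.Set (Char × Char) :=
  l.foldl (fun S sd => pvWinScan sd.1 sd.2 S) S

theorem pvWinA_short (l : List Char) (d : Int) (S : _) (h : l.length ≤ 2) :
    pvWinA l d S = S := by
  rcases l with _ | ⟨a, _ | ⟨b, _ | ⟨c, r⟩⟩⟩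
  · rfl
  · rfl
  · rfl
  · simp at h

theorem pvWinA_eq_winScan (l : List Char) (d : Int) (S : _)
    (h : l.all PySem.Chars.isalpha = true) : pvWinA l d S = pvWinScan l d S := by
  induction l, d, S using pvWinA.induct with
  | case1 a b c rest d S ih =>
    simp only [List.all_cons, Bool.and_eq_true] at h ih
    show pvWinA (b :: c :: rest) d (pvUpdA S a b c d) = pvWinScan (b :: c :: rest) d (pvUpdB S a b c d)
    rw [ih ⟨h.2.1, h.2.2⟩]
    congr 1
    simp only [pvUpdA, pvUpdB, PySem.Chars.strIsalpha, List.all_cons, List.all_nil,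
      h.1, h.2.1, h.2.2.1, Bool.and_self, Bool.and_true]
    rfl
  | case2 l d S h2 =>
    rcases l with _ | ⟨a, _ | ⟨b, _ | ⟨c, r⟩⟩⟩
    · rfl
    · rfl
    · rfl
    · exact (h2 a b c r rfl).elim

theorem pvWinA_snoc3 (l : List Char) (a b z : Char) (d : Int) (S : _) :
    pvWinA (l ++ [a, b, z]) d S = pvUpdA (pvWinA (l ++ [a, b]) d S) a b z d := by
  induction l generalizing S with
  | nil => rfl
  | cons x l' ih =>
    rcases l' with _ | ⟨y, _ | ⟨w, l''⟩⟩
    · rfl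
    · rfl
    · exact ih (pvUpdA S x y w d)

theorem pvWinA_nonalpha (l : List Char) (c : Char) (t : List Char) (d : Int) (S : _)
    (hc : PySem.Chars.isalpha c = false) (ht : t.length ≤ 1) :
    pvWinA (l ++ c :: t) d S = pvWinA l d S := by
  induction l generalizing S with
  | nil =>
    rcases t with _ | ⟨u, _ | ⟨v, t'⟩⟩
    · rfl
    · rfl
    · simp at ht
  | cons x l' ih =>
    rcases l' with _ | ⟨y, l''⟩
    · rcases t with _ | ⟨u, _ | ⟨v, t'⟩⟩
      · rfl
      · show pvWinA [c, u] d (pvUpdA S x c u d) = S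
        have : pvUpdA S x c u d = S := by
          simp [pvUpdA, PySem.Chars.strIsalpha, hc]
        rw [this]; rfl
      · simp at ht
    · rcases l'' with _ | ⟨w, l'''⟩
      · show pvWinA (y :: c :: t) d (pvUpdA S x y c d) = pvWinA [x, y] d S
        have h1 : pvUpdA S x y c d = S := by
          simp [pvUpdA, PySem.Chars.strIsalpha, hc]
        rw [h1]
        simpa using ih S
      · show pvWinA (y :: w :: (l''' ++ c :: t)) d (pvUpdA S x y w d) =
          pvWinA (y :: w :: l''') d (pvUpdA S x y w d)
        exact ih (pvUpdA S x y w d)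

theorem pvSegLoop_append (cs : List Char) (segs : List (List Char × Int)) (d : Int)
    (cur : List Char) (cd : Int) :
    pvSegLoop cs segs d cur cd = segs ++ pvSegLoop cs [] d cur cd := by
  induction cs generalizing segs cur cd d with
  | nil =>
    by_cases h : cur = [] <;> simp [pvSegLoop, h]
  | cons c rest ih =>
    by_cases ha : PySem.Chars.isalpha c
    · simp only [pvSegLoop, ha, if_true]
      rw [ih]
    · by_cases h : cur = [] <;>
        simp only [pvSegLoop, ha, h, if_true, if_false, Bool.false_eq_true]
      · rw [ih]
      · rw [ih, ih ([] ++ [(cur, cd)])]; simp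

theorem pvLoopA_short (l : List Char) (d : Int) (S : PySem.Set (Char × Char) × PySem.Set (Char × Char))
    (h : l.length ≤ 2) : pvLoopA l d S = S := by
  rcases l with _ | ⟨a, _ | ⟨b, _ | ⟨c, r⟩⟩⟩
  · rfl
  · rfl
  · rfl
  · simp at h

theorem pvUpdA_noop (S : PySem.Set (Char × Char) × PySem.Set (Char × Char)) (a b c : Char)
    (d : Int) (h : PySem.Chars.isalpha a = false) : pvUpdA S a b c d = S := by
  simp [pvUpdA, PySem.Chars.strIsalpha, h]

theorem pvMainInv (cs : List Char) (d : Int) (pre : List Char) (cd : Int) (S : _)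
    (hpre : pre.all PySem.Chars.isalpha = true) (hcd : pre = [] ∨ cd = d) :
    pvLoopA cs d (pvWinA (pre ++ cs.take 2) d S) = pvScanSegs (pvSegLoop cs [] d pre cd) S := by
  induction cs generalizing d pre cd S with
  | nil =>
    simp only [List.take_nil, List.append_nil, pvSegLoop]
    by_cases h : pre = []
    · subst h; simp [pvScanSegs, pvWinA, pvLoopA]
    · rcases hcd with h' | h'
      · exact absurd h' h
      · simp only [h, if_false, pvScanSegs, List.foldl_nil, h']
        exact pvWinA_eq_winScan pre d S hpre
  | cons c cs' ih =>
    by_cases ha : PySem.Chars.isalpha c = true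
    · -- alphabetic: the run continues
      have hb1 : c ≠ '[' := by rintro rfl; exact absurd ha (by decide)
      have hb2 : c ≠ ']' := by rintro rfl; exact absurd ha (by decide)
      have hpre' : (pre ++ [c]).all PySem.Chars.isalpha = true := by
        simp [List.all_append, hpre, ha]
      have hcd' : (if pre = [] then d else cd) = d := by
        rcases hcd with h' | h'
        · simp [h']
        · by_cases h : pre = [] <;> simp [h, h']
      have hrhs : pvSegLoop (c :: cs') [] d pre cd =
          pvSegLoop cs' [] d (pre ++ [c]) (if pre = [] then d else cd) := by
        simp [pvSegLoop, ha]
      rw [hrhs, ← ih d (pre ++ [c]) _ S hpre' (Or.inr hcd')]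
      rcases cs' with _ | ⟨y, _ | ⟨z, cs''⟩⟩
      · rw [pvLoopA_short _ _ _ (by simp), pvLoopA_short _ _ _ (by simp)]
        simp
      · rw [pvLoopA_short _ _ _ (by simp), pvLoopA_short _ _ _ (by simp)]
        simp
      · show pvLoopA (c :: y :: z :: cs'') d (pvWinA (pre ++ [c, y]) d S) = _
        have hstep : pvLoopA (c :: y :: z :: cs'') d (pvWinA (pre ++ [c, y]) d S) =
            pvLoopA (y :: z :: cs'') d (pvUpdA (pvWinA (pre ++ [c, y]) d S) c y z d) := by
          simp only [pvLoopA, hb1, hb2, if_false]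
        rw [hstep, ← pvWinA_snoc3]
        simp
    · -- non-alphabetic: the run (if any) is flushed
      have hc : PySem.Chars.isalpha c = false := by simpa using ha
      have hrhs : pvSegLoop (c :: cs') [] d pre cd =
          (if pre = [] then [] else [(pre, cd)]) ++
            pvSegLoop cs' [] (if c = '[' then d + 1 else if c = ']' then d - 1 else d) [] cd := by
        simp only [pvSegLoop, hc, Bool.false_eq_true, if_false]
        rw [pvSegLoop_append]
        by_cases h : pre = [] <;> simp [h]
      rw [hrhs]
      have hsplit : pvScanSegs ((if pre = [] then [] else [(pre, cd)]) ++
          pvSegLoop cs' [] (if c = '[' then d + 1 else if c = ']' then d - 1 else d) [] cd) S =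
          pvScanSegs (pvSegLoop cs' [] (if c = '[' then d + 1 else if c = ']' then d - 1 else d) [] cd)
            (pvScanSegs (if pre = [] then [] else [(pre, cd)]) S) := by
        simp [pvScanSegs, List.foldl_append]
      rw [hsplit]
      have hS' : pvScanSegs (if pre = [] then [] else [(pre, cd)]) S = pvWinA pre d S := by
        by_cases h : pre = []
        · subst h; simp [pvScanSegs, pvWinA]
        · rcases hcd with h' | h'
          · exact absurd h' h
          · simp only [h, if_false, pvScanSegs, List.foldl_cons, List.foldl_nil, h']
            exact (pvWinA_eq_winScan pre d S hpre).symm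
      rw [hS']
      rw [← ih _ [] cd (pvWinA pre d S) rfl (Or.inl rfl)]
      rw [List.nil_append, pvWinA_short _ _ _ (List.length_take_le _ _)]
      rcases cs' with _ | ⟨y, _ | ⟨z, cs''⟩⟩
      · rw [pvLoopA_short _ _ _ (by simp), pvLoopA_short _ _ _ (by simp)]
        exact pvWinA_nonalpha pre c [] d S hc (by simp)
      · rw [pvLoopA_short _ _ _ (by simp), pvLoopA_short _ _ _ (by simp)]
        exact pvWinA_nonalpha pre c [y] d S hc (by simp)
      · have hw : pvWinA (pre ++ List.take 2 (c :: y :: z :: cs'')) d S = pvWinA pre d S := by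
          show pvWinA (pre ++ c :: [y]) d S = pvWinA pre d S
          exact pvWinA_nonalpha pre c [y] d S hc (by simp)
        rw [show pre ++ List.take 2 (c :: y :: z :: cs'') = pre ++ [c, y] from by simp] at *
        rw [hw]
        by_cases h1 : c = '['
        · subst h1
          show pvLoopA ('[' :: y :: z :: cs'') d (pvWinA pre d S) = _
          simp only [pvLoopA, if_true]
        · by_cases h2 : c = ']'
          · subst h2
            show pvLoopA (']' :: y :: z :: cs'') d (pvWinA pre d S) = _
            simp only [pvLoopA, h1, if_false, if_true]
          · show pvLoopA (c :: y :: z :: cs'') d (pvWinA pre d S) = _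
            simp only [pvLoopA, h1, h2, if_false]
            rw [pvUpdA_noop _ _ _ _ _ hc]


-- ===== VERDICT (by name: the statement is the Claim_ definition above) =====
theorem pvLenPos (x : List (Char × Char)) : decide (0 < PySem.Set.len x) = decide (x ≠ []) := by
  cases x <;> simp [PySem.Set.len]

theorem SSL_spec : Claim_equal_SSL := by
  intro ip _
  show SSL ip = SSL_alt ip
  unfold SSL SSL_alt
  have h := pvMainInv ip.toList 0 [] 0 (PySem.Set.empty, PySem.Set.empty) rfl (Or.inl rfl)
  rw [List.nil_append, pvWinA_short _ _ _ (List.length_take_le _ _)] at h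
  rw [pvScanSegs] at h
  rw [h, pvLenPos]
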